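-- pv_equiv track=rewrite | github.com/zackmdavis/Exercises_A | Advent_of_Code/2015/day_11.py | has_two_pair
-- ===== SOURCE A (Python) =====
-- def has_two_pair(password):
--     pairs = []
--     for i in range(len(password)-1):
--         if password[i+1] == password[i]:
--             if not pairs or pairs[-1][0] != i-1:
--                 pairs.append((i, password[i]))
--     if len(pairs) >= 2 and not all(c == pairs[0][1] for i, c in pairs):
--         return True
--     return False
-- ===== SOURCE B (Python) =====
-- def has_two_pair(password):
--     doubled = set()
--     for x, y in zip(password, password[1:]):
--         if x == y:
--             doubled.add(x)
--     return len(doubled) >= 2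
-- ===== Notes on version B (the rewrite author's own statement) =====
-- stated objective: simpler
-- what changed: Replaces the indexed list of (position, letter) pairs with the overlap-skip branch and the final all()/len check by one pass over adjacent character pairs collecting the distinct doubled letters into a set, returning whether at least two exist.
import Mathlib
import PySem

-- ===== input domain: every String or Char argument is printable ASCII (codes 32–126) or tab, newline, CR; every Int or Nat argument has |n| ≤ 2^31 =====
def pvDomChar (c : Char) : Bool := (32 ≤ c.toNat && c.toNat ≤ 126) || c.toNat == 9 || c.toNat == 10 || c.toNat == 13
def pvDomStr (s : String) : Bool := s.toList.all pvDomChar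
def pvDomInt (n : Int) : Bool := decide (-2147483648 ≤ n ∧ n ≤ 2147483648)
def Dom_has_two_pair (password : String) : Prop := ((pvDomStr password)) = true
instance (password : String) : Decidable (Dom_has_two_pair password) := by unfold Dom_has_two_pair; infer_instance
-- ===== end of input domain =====

-- B replaces A's indexed (position, letter) pair list, its overlap-skip branch and its
-- final all()/len check by one pass collecting the distinct doubled letters into a set
-- (objective: simpler).

-- ===== PORT A =====
-- pairs[-1] is ported as getLast?.getD (in the loop it is only read when pairs ≠ []),
-- pairs[0] as headD (only read when pairs.length ≥ 2), password[i] as pyGetD (i and i+1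
-- are always in range for i ∈ range(len(password)-1)).
def has_two_pair (password : String) : Bool :=
  let cs := password.toList
  let pairs := (PySem.List.pyRange 0 ((cs.length : Int) - 1) 1).foldl
    (fun (pairs : List (Int × Char)) i =>
      if PySem.List.pyGetD cs (i + 1) ' ' == PySem.List.pyGetD cs i ' ' then
        if pairs.isEmpty || ((pairs.getLast?.getD ((0 : Int), ' ')).1 != i - 1) then
          pairs ++ [(i, PySem.List.pyGetD cs i ' ')]
        else pairs
      else pairs) []
  if 2 ≤ pairs.length && ! pairs.all (fun p => p.2 == (pairs.headD ((0 : Int), ' ')).2) then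
    true
  else
    false

-- ===== PORT B =====
def has_two_pair_alt (password : String) : Bool :=
  let cs := password.toList
  let doubled : PySem.Set Char := (cs.zip cs.tail).foldl
    (fun s p => if p.1 == p.2 then PySem.Set.add s p.1 else s) PySem.Set.empty
  decide (2 ≤ doubled.length)

-- ===== PRECONDITION & SPEC =====
def Spec_has_two_pair (password : String) (out : Bool) : Prop := out = has_two_pair_alt password
instance (password : String) (out : Bool) : Decidable (Spec_has_two_pair password out) := by unfold Spec_has_two_pair; infer_instance

-- ===== CLAIM (what is proved, stated in full; the proofs are below) =====
def Claim_equal_has_two_pair : Prop := ∀ (password : String), Dom_has_two_pair password → Spec_has_two_pair password (has_two_pair password)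

-- ===== LEMMAS AND PROOFS =====

def pvStepA (cs : List Char) (pairs : List (Int × Char)) (i : Int) : List (Int × Char) :=
  if PySem.List.pyGetD cs (i + 1) ' ' == PySem.List.pyGetD cs i ' ' then
    if pairs.isEmpty || ((pairs.getLast?.getD ((0 : Int), ' ')).1 != i - 1) then
      pairs ++ [(i, PySem.List.pyGetD cs i ' ')]
    else pairs
  else pairs

def pvStepB (s : PySem.Set Char) (p : Char × Char) : PySem.Set Char :=
  if p.1 == p.2 then PySem.Set.add s p.1 else s

def pvInv (cs : List Char) (start : Nat) (pairs : List (Int × Char)) : Prop :=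
  ∀ p ∈ pairs, 0 ≤ p.1 ∧ p.1 < (start : Int) ∧
    cs[p.1.toNat]? = some p.2 ∧ cs[p.1.toNat + 1]? = some p.2

theorem pvLoop (cs : List Char) (k : Nat) : ∀ (start : Nat),
    (((cs.length : Int) - 1 - start).toNat = k) →
    ∀ (pairs : List (Int × Char)) (s : PySem.Set Char),
    pvInv cs start pairs →
    (∀ c, c ∈ pairs.map Prod.snd ↔ c ∈ s) →
    s.Nodup →
    (∀ c, c ∈ ((PySem.List.pyRange (start : Int) ((cs.length : Int) - 1) 1).foldl (pvStepA cs) pairs).map Prod.snd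
        ↔ c ∈ (((cs.zip cs.tail).drop start).foldl pvStepB s)) ∧
    (((cs.zip cs.tail).drop start).foldl pvStepB s).Nodup := by
  induction k with
  | zero =>
    intro start hk pairs s hinv hmem hnd
    have hle : (cs.length : Int) - 1 ≤ (start : Int) := by omega
    have hz : (cs.zip cs.tail).length ≤ start := by
      simp [List.length_zip]; omega
    rw [PySem.List.pyRange_one_eq_nil hle, List.drop_eq_nil_of_le hz]
    exact ⟨hmem, hnd⟩
  | succ k ih =>
    intro start hk pairs s hinv hmem hnd
    have hlt : (start : Int) < (cs.length : Int) - 1 := by omega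
    have hlen : start + 1 < cs.length := by omega
    have hzlt : start < (cs.zip cs.tail).length := by
      simp [List.length_zip]; omega
    rw [PySem.List.pyRange_one_cons hlt, List.drop_eq_getElem_cons hzlt,
        List.foldl_cons, List.foldl_cons]
    have hzget : (cs.zip cs.tail)[start] = (cs[start], cs[start + 1]) := by
      simp [List.getElem_zip, List.getElem_tail]
    have hget0 : PySem.List.pyGetD cs (start : Int) ' ' = cs[start] := by
      rw [PySem.List.pyGetD_natCast]; exact List.getD_eq_getElem _ _ (by omega)
    have hget1 : PySem.List.pyGetD cs ((start : Int) + 1) ' ' = cs[start + 1] := by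
      rw [show ((start : Int) + 1) = ((start + 1 : Nat) : Int) by push_cast; ring,
          PySem.List.pyGetD_natCast]
      exact List.getD_eq_getElem _ _ (by omega)
    have hk' : (((cs.length : Int) - 1 - (start + 1 : Nat)).toNat = k) := by push_cast; omega
    by_cases heq : cs[start + 1] = cs[start]
    · -- doubled pair at start
      have hstepB : pvStepB s (cs.zip cs.tail)[start] = PySem.Set.add s cs[start] := by
        simp [pvStepB, hzget, heq]
      by_cases hcond : (pairs.isEmpty || ((pairs.getLast?.getD ((0 : Int), ' ')).1 != (start : Int) - 1)) = true
      · -- append branch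
        have hstepA : pvStepA cs pairs (start : Int) = pairs ++ [((start : Int), cs[start])] := by
          simp only [pvStepA, hget0, hget1, heq, beq_self_eq_true, if_true, hcond]
        rw [hstepA, hstepB]
        refine ih (start + 1) hk' _ _ ?_ ?_ (PySem.Set.nodup_add _ _ hnd)
        · intro p hp
          rcases List.mem_append.mp hp with h | h
          · obtain ⟨h1, h2, h3, h4⟩ := hinv p h
            exact ⟨h1, by push_cast; omega, h3, h4⟩
          · simp at h
            subst h
            refine ⟨by positivity, by push_cast; omega, ?_, ?_⟩ <;>
              simp [Int.toNat_natCast, hlen, heq]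
        · intro c
          simp [PySem.Set.mem_add, hmem c, or_comm]
      · -- skip branch: last pair has index start-1, same letter
        have hne : pairs ≠ [] := by
          intro h; subst h; simp at hcond
        obtain ⟨q, hq⟩ := List.getLast?_isSome.mpr hne |> Option.isSome_iff_exists.mp
        have hqmem : q ∈ pairs := List.mem_of_getLast? hq
        have hqidx : q.1 = (start : Int) - 1 := by
          simp [Bool.or_eq_true, List.isEmpty_iff, hne, hq] at hcond
          exact hcond
        obtain ⟨h1, h2, h3, h4⟩ := hinv q hqmem
        have hq1 : q.1.toNat + 1 = start := by omega
        have hqa : q.2 = cs[start] := by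
          rw [hq1] at h4
          rw [List.getElem?_eq_getElem (by omega)] at h4
          exact (Option.some_inj.mp h4).symm
        have hamem : cs[start] ∈ s := (hmem cs[start]).mp (by
          exact List.mem_map.mpr ⟨q, hqmem, hqa ▸ rfl⟩)
        have hcond' : (pairs.isEmpty || ((pairs.getLast?.getD ((0 : Int), ' ')).1 != (start : Int) - 1)) = false := by
          simpa using hcond
        have hstepA : pvStepA cs pairs (start : Int) = pairs := by
          simp only [pvStepA, hget0, hget1, heq, beq_self_eq_true, if_true, hcond',
            Bool.false_eq_true, if_false]
        have hstepB' : pvStepB s (cs.zip cs.tail)[start] = s := by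
          rw [hstepB]; exact PySem.Set.add_of_mem hamem
        rw [hstepA, hstepB']
        refine ih (start + 1) hk' _ _ ?_ hmem hnd
        intro p hp
        obtain ⟨a1, a2, a3, a4⟩ := hinv p hp
        exact ⟨a1, by push_cast; omega, a3, a4⟩
    · -- no doubled pair here
      have hstepA : pvStepA cs pairs (start : Int) = pairs := by
        simp only [pvStepA, hget0, hget1]
        rw [if_neg (by simpa using heq)]
      have hstepB : pvStepB s (cs.zip cs.tail)[start] = s := by
        simp [pvStepB, hzget]
        intro h; exact absurd h.symm heq
      rw [hstepA, hstepB]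
      refine ih (start + 1) hk' _ _ ?_ hmem hnd
      intro p hp
      obtain ⟨a1, a2, a3, a4⟩ := hinv p hp
      exact ⟨a1, by push_cast; omega, a3, a4⟩

theorem pvTwoMem {α : Type} {l : List α} {a b : α} (ha : a ∈ l) (hb : b ∈ l) (h : a ≠ b) :
    2 ≤ l.length := by
  match l with
  | [] => simp at ha
  | [x] =>
    simp only [List.mem_singleton] at ha hb
    exact absurd (ha.trans hb.symm) h
  | x :: y :: t => simp

theorem pvNodupTwo {l : List Char} (hnd : l.Nodup) (h : 2 ≤ l.length) :
    ∃ a ∈ l, ∃ b ∈ l, a ≠ b := by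
  match l with
  | a :: b :: t =>
    refine ⟨a, by simp, b, by simp, ?_⟩
    intro hab
    subst hab
    simp at hnd

theorem pv_main_eq (password : String) : has_two_pair password = has_two_pair_alt password := by
  set cs := password.toList with hcs
  set P := (PySem.List.pyRange 0 ((cs.length : Int) - 1) 1).foldl (pvStepA cs) [] with hP
  set S := (cs.zip cs.tail).foldl pvStepB PySem.Set.empty with hS
  have hA : has_two_pair password =
      (if (decide (2 ≤ P.length) && ! P.all (fun p => p.2 == (P.headD ((0 : Int), ' ')).2))
       then true else false) := rfl
  have hB : has_two_pair_alt password = decide (2 ≤ S.length) := rfl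
  obtain ⟨hmem, hnd⟩ := pvLoop cs ((cs.length : Int) - 1).toNat 0 (by simp) [] PySem.Set.empty
    (by intro p hp; simp at hp) (by simp [PySem.Set.empty]) (by simp [PySem.Set.empty])
  rw [List.drop_zero] at hmem hnd
  rw [Nat.cast_zero] at hmem
  rw [← hP, ← hS] at hmem
  rw [← hS] at hnd
  by_cases hlen : 2 ≤ S.length
  · -- S has two distinct letters; A's condition holds
    obtain ⟨a, haS, b, hbS, hab⟩ := pvNodupTwo hnd hlen
    obtain ⟨pa, hpaP, hpa2⟩ := List.mem_map.mp ((hmem a).mpr haS)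
    obtain ⟨pb, hpbP, hpb2⟩ := List.mem_map.mp ((hmem b).mpr hbS)
    have hPlen : 2 ≤ P.length :=
      pvTwoMem hpaP hpbP (by intro h; rw [h] at hpa2; exact hab (hpa2.symm.trans hpb2))
    have hall : (P.all (fun p => p.2 == (P.headD ((0 : Int), ' ')).2)) = false := by
      simp only [List.all_eq_false, beq_iff_eq]
      by_cases hha : a = (P.headD ((0 : Int), ' ')).2
      · refine ⟨pb, hpbP, ?_⟩
        rw [hpb2, ← hha]
        exact fun h => hab h.symm
      · refine ⟨pa, hpaP, ?_⟩
        rw [hpa2]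
        exact hha
    rw [hA, hB, hall]
    simp [hPlen, hlen]
  · -- S has at most one letter; A's condition fails
    have hkey : ¬ (2 ≤ P.length ∧ (P.all (fun p => p.2 == (P.headD ((0 : Int), ' ')).2)) = false) := by
      rintro ⟨hPlen, hall⟩
      have hPne : P ≠ [] := by intro h; rw [h] at hPlen; simp at hPlen
      obtain ⟨p, hpP, hne⟩ := List.all_eq_false.mp hall
      have hhm : P.headD ((0 : Int), ' ') ∈ P := by
        obtain ⟨x, t, hxt⟩ := List.exists_cons_of_ne_nil hPne
        rw [hxt]; exact List.mem_cons_self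
      have h1 : (P.headD ((0 : Int), ' ')).2 ∈ S :=
        (hmem _).mp (List.mem_map.mpr ⟨_, hhm, rfl⟩)
      have h2 : p.2 ∈ S := (hmem _).mp (List.mem_map.mpr ⟨_, hpP, rfl⟩)
      exact hlen (pvTwoMem h2 h1 (by simpa using hne))
    have hcond : (decide (2 ≤ P.length) && ! P.all (fun p => p.2 == (P.headD ((0 : Int), ' ')).2)) = false := by
      by_cases h1 : 2 ≤ P.length
      · have hall : (P.all (fun p => p.2 == (P.headD ((0 : Int), ' ')).2)) = true := by
          by_contra hno
          exact hkey ⟨h1, by simpa using hno⟩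
        rw [hall]; simp
      · simp [h1]
    rw [hA, hB, hcond]
    simp [hlen]

-- ===== VERDICT (by name: the statement is the Claim_ definition above) =====
theorem has_two_pair_spec : Claim_equal_has_two_pair := by
  intro password _
  unfold Spec_has_two_pair
  exact pv_main_eq password
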